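-- pv_equiv track=rewrite | github.com/giselabcruz/bio_exercises_PairWiseAligner | Exercise1/exercise2.py | formatear_bloques
-- ===== SOURCE A (Python) =====
-- def formatear_bloques(alA, alB, etiqueta_arriba="Secuencia A", etiqueta_abajo="Secuencia B", ancho=60, off_a=0, off_b=0):
--     i = 0
--     out = []
--     while i < len(alA):
--         sA = alA[i:i+ancho]
--         sB = alB[i:i+ancho]
--         mid = "".join('|' if (a == b and a != '-' and b != '-') else ('.' if a != '-' and b != '-' else ' ')
--                       for a,b in zip(sA,sB))
--         startA = off_a + sum(1 for c in alA[:i] if c != '-') + 1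
--         endA   = startA + sum(1 for c in sA      if c != '-') - 1
--         startB = off_b + sum(1 for c in alB[:i] if c != '-') + 1
--         endB   = startB + sum(1 for c in sB      if c != '-') - 1
--
--         out.append(f"{etiqueta_arriba:<12} {startA:>6} {sA} {endA}")
--         out.append(f"{'':<12} {'':>6} {mid}")
--         out.append(f"{etiqueta_abajo:<12} {startB:>6} {sB} {endB}\n")
--         i += ancho
--     return "\n".join(out).rstrip()
-- ===== SOURCE B (Python) =====
-- def formatear_bloques(alA, alB, etiqueta_arriba="Secuencia A", etiqueta_abajo="Secuencia B", ancho=60, off_a=0, off_b=0):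
--     def simb(a, b):
--         if a == '-' or b == '-':
--             return ' '
--         return '|' if a == b else '.'
--     blocks = []
--     posA, posB = off_a, off_b
--     i = 0
--     while i < len(alA):
--         sA = alA[i:i+ancho]
--         sB = alB[i:i+ancho]
--         mid = ''.join(map(simb, sA, sB))
--         nA = len(sA) - sA.count('-')
--         nB = len(sB) - sB.count('-')
--         blocks.append(f"{etiqueta_arriba:<12} {posA + 1:>6} {sA} {posA + nA}\n"
--                       f"{'':<12} {'':>6} {mid}\n"
--                       f"{etiqueta_abajo:<12} {posB + 1:>6} {sB} {posB + nB}\n\n")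
--         posA += nA
--         posB += nB
--         i += ancho
--     return "".join(blocks).rstrip()
-- ===== Notes on version B (the rewrite author's own statement) =====
-- stated objective: faster
-- what changed: B carries running non-gap position counters (and block strings joined directly) through one pass instead of A's re-summing of the whole alignment prefix alA[:i]/alB[:i] at every block.
import Mathlib
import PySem

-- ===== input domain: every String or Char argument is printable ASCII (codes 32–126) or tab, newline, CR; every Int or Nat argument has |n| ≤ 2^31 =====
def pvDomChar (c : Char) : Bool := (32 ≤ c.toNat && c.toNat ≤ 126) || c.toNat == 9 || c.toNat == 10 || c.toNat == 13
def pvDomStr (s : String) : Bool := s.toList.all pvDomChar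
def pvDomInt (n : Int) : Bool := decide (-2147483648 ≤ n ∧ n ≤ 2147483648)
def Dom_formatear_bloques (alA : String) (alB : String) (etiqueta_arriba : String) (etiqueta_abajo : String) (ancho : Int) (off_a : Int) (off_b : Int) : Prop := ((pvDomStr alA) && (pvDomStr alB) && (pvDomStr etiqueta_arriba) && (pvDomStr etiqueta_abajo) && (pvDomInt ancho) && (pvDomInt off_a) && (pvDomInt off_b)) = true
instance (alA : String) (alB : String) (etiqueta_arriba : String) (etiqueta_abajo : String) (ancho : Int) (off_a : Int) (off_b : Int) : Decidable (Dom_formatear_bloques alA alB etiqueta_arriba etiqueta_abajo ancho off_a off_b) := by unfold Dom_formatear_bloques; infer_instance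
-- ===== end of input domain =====

-- B replaces A's per-block re-summing of the non-gap prefix counts by running counters
-- carried through one pass (objective: faster, asymptotic O(n) vs O(n^2/ancho)).

-- ===== PORT A =====
-- f"{s:<w}" / f"{n:>w}" with a plain value: pad with spaces, never truncate (exact for width literals 12/6 used here)
def pvPadL (cs : List Char) (w : Nat) : List Char := cs ++ List.replicate (w - cs.length) ' '
def pvPadR (cs : List Char) (w : Nat) : List Char := List.replicate (w - cs.length) ' ' ++ cs

-- A's while-loop; fuel = len(alA)+1 is enough under Pre_ (each step advances i by ancho ≥ 1)
def pvLoopA (la lb ea eb : List Char) (ancho off_a off_b : Int) : Nat → Int → List (List Char) → List (List Char)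
  | 0, _, out => out
  | fuel+1, i, out =>
    if i < (la.length : Int) then
      let sA := PySem.List.slice la (some i) (some (i+ancho))
      let sB := PySem.List.slice lb (some i) (some (i+ancho))
      let mid := (sA.zip sB).map (fun ab =>
        if ab.1 == ab.2 && ab.1 != '-' && ab.2 != '-' then '|'
        else if ab.1 != '-' && ab.2 != '-' then '.' else ' ')
      let startA := off_a + ((PySem.List.slice la none (some i)).countP (fun c => c != '-') : Int) + 1
      let endA := startA + ((sA.countP (fun c => c != '-') : Int)) - 1
      let startB := off_b + ((PySem.List.slice lb none (some i)).countP (fun c => c != '-') : Int) + 1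
      let endB := startB + ((sB.countP (fun c => c != '-') : Int)) - 1
      let l1 := pvPadL ea 12 ++ ' ' :: pvPadR (PySem.Int.toChars startA) 6 ++ ' ' :: sA ++ ' ' :: PySem.Int.toChars endA
      let l2 := pvPadL [] 12 ++ ' ' :: pvPadR [] 6 ++ ' ' :: mid
      let l3 := (pvPadL eb 12 ++ ' ' :: pvPadR (PySem.Int.toChars startB) 6 ++ ' ' :: sB ++ ' ' :: PySem.Int.toChars endB) ++ ['\n']
      pvLoopA la lb ea eb ancho off_a off_b fuel (i + ancho) (out ++ [l1, l2, l3])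
    else out

def formatear_bloques (alA : String) (alB : String) (etiqueta_arriba : String) (etiqueta_abajo : String) (ancho : Int) (off_a : Int) (off_b : Int) : String :=
  String.ofList (PySem.Chars.rstrip (PySem.Chars.join ['\n']
    (pvLoopA alA.toList alB.toList etiqueta_arriba.toList etiqueta_abajo.toList ancho off_a off_b (alA.toList.length + 1) 0 [])))

-- ===== PORT B =====
def pvSimb (a b : Char) : Char :=
  if a == '-' || b == '-' then ' ' else if a == b then '|' else '.'

-- B's while-loop: running non-gap counters posA/posB, one block string per step
def pvLoopB (la lb ea eb : List Char) (ancho : Int) : Nat → Int → Int → Int → List (List Char) → List (List Char)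
  | 0, _, _, _, blocks => blocks
  | fuel+1, i, posA, posB, blocks =>
    if i < (la.length : Int) then
      let sA := PySem.List.slice la (some i) (some (i+ancho))
      let sB := PySem.List.slice lb (some i) (some (i+ancho))
      let mid := (sA.zip sB).map (fun ab => pvSimb ab.1 ab.2)
      let nA := (sA.length : Int) - (sA.count '-' : Int)
      let nB := (sB.length : Int) - (sB.count '-' : Int)
      let blk := (pvPadL ea 12 ++ ' ' :: pvPadR (PySem.Int.toChars (posA+1)) 6 ++ ' ' :: sA ++ ' ' :: PySem.Int.toChars (posA+nA)) ++ '\n' ::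
                 ((pvPadL [] 12 ++ ' ' :: pvPadR [] 6 ++ ' ' :: mid) ++ '\n' ::
                 ((pvPadL eb 12 ++ ' ' :: pvPadR (PySem.Int.toChars (posB+1)) 6 ++ ' ' :: sB ++ ' ' :: PySem.Int.toChars (posB+nB)) ++ ['\n', '\n']))
      pvLoopB la lb ea eb ancho fuel (i + ancho) (posA + nA) (posB + nB) (blocks ++ [blk])
    else blocks

def formatear_bloques_alt (alA : String) (alB : String) (etiqueta_arriba : String) (etiqueta_abajo : String) (ancho : Int) (off_a : Int) (off_b : Int) : String :=
  String.ofList (PySem.Chars.rstrip (PySem.Chars.join []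
    (pvLoopB alA.toList alB.toList etiqueta_arriba.toList etiqueta_abajo.toList ancho (alA.toList.length + 1) 0 off_a off_b [])))

-- ===== PRECONDITION & SPEC =====
-- Pre_ excludes only inputs where A never returns: with ancho ≤ 0 and nonempty alA the while-loop never advances past len(alA) (A diverges)
def Pre_formatear_bloques (alA : String) (alB : String) (etiqueta_arriba : String) (etiqueta_abajo : String) (ancho : Int) (off_a : Int) (off_b : Int) : Prop :=
  alA.toList = [] ∨ 1 ≤ ancho
instance (alA : String) (alB : String) (etiqueta_arriba : String) (etiqueta_abajo : String) (ancho : Int) (off_a : Int) (off_b : Int) : Decidable (Pre_formatear_bloques alA alB etiqueta_arriba etiqueta_abajo ancho off_a off_b) := by unfold Pre_formatear_bloques; infer_instance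
def pvWitness_formatear_bloques : String × String × String × String × Int × Int × Int := ("AC-GT", "A-CGT", "Secuencia A", "Secuencia B", 3, 0, 0)
def Spec_formatear_bloques (alA : String) (alB : String) (etiqueta_arriba : String) (etiqueta_abajo : String) (ancho : Int) (off_a : Int) (off_b : Int) (out : String) : Prop := out = formatear_bloques_alt alA alB etiqueta_arriba etiqueta_abajo ancho off_a off_b
instance (alA : String) (alB : String) (etiqueta_arriba : String) (etiqueta_abajo : String) (ancho : Int) (off_a : Int) (off_b : Int) (out : String) : Decidable (Spec_formatear_bloques alA alB etiqueta_arriba etiqueta_abajo ancho off_a off_b out) := by unfold Spec_formatear_bloques; infer_instance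

-- ===== CLAIM (what is proved, stated in full; the proofs are below) =====
def Claim_equal_formatear_bloques : Prop := ∀ (alA : String) (alB : String) (etiqueta_arriba : String) (etiqueta_abajo : String) (ancho : Int) (off_a : Int) (off_b : Int), Dom_formatear_bloques alA alB etiqueta_arriba etiqueta_abajo ancho off_a off_b → Pre_formatear_bloques alA alB etiqueta_arriba etiqueta_abajo ancho off_a off_b → Spec_formatear_bloques alA alB etiqueta_arriba etiqueta_abajo ancho off_a off_b (formatear_bloques alA alB etiqueta_arriba etiqueta_abajo ancho off_a off_b)

-- ===== LEMMAS AND PROOFS =====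

-- accumulator extraction
lemma pvLoopA_acc (la lb ea eb : List Char) (ancho off_a off_b : Int) (fuel : Nat) :
    ∀ (i : Int) (out : List (List Char)),
      pvLoopA la lb ea eb ancho off_a off_b fuel i out = out ++ pvLoopA la lb ea eb ancho off_a off_b fuel i [] := by
  induction fuel with
  | zero => intro i out; simp [pvLoopA]
  | succ n ih =>
    intro i out
    simp only [pvLoopA]
    split_ifs with h
    · rw [ih]; conv_rhs => rw [ih]
      simp
    · simp

lemma pvLoopB_acc (la lb ea eb : List Char) (ancho : Int) (fuel : Nat) :
    ∀ (i posA posB : Int) (blocks : List (List Char)),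
      pvLoopB la lb ea eb ancho fuel i posA posB blocks = blocks ++ pvLoopB la lb ea eb ancho fuel i posA posB [] := by
  induction fuel with
  | zero => intro i pA pB blocks; simp [pvLoopB]
  | succ n ih =>
    intro i pA pB blocks
    simp only [pvLoopB]
    split_ifs with h
    · rw [ih]; conv_rhs => rw [ih]
      simp
    · simp

lemma pv_join_nil_flatten (L : List (List Char)) : PySem.Chars.join [] L = L.flatten := by
  induction L with
  | nil => simp [PySem.Chars.join_nil]
  | cons p rest ih =>
    cases rest with
    | nil => simp [PySem.Chars.join_singleton]
    | cons q r => rw [PySem.Chars.join_cons_cons]; simp_all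

lemma pv_simb_eq (a b : Char) :
    pvSimb a b = (if a == b && a != '-' && b != '-' then '|'
                  else if a != '-' && b != '-' then '.' else ' ') := by
  by_cases h1 : a = '-' <;> by_cases h2 : b = '-' <;> by_cases h3 : a = b <;>
    simp_all [pvSimb]

lemma pv_nongap_count (s : List Char) :
    (s.length : Int) - (s.count '-' : Int) = (s.countP (fun c => c != '-') : Int) := by
  induction s with
  | nil => simp
  | cons c t ih =>
    by_cases h : c = '-' <;> simp [h] <;> omega

-- the main loop relation: with running counters equal to the prefix non-gap counts,
-- B's blocks flatten to A's lines each followed by '\n'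
lemma pv_loops_rel (la lb ea eb : List Char) (w : Nat) (off_a off_b : Int) (fuel : Nat) :
    ∀ (j : Nat),
      (pvLoopB la lb ea eb (w : Int) fuel (j : Int)
          (off_a + ((la.take j).countP (fun c => c != '-') : Int))
          (off_b + ((lb.take j).countP (fun c => c != '-') : Int)) []).flatten
      = (pvLoopA la lb ea eb (w : Int) off_a off_b fuel (j : Int) []).flatMap (fun l => l ++ ['\n']) := by
  induction fuel with
  | zero => intro j; simp [pvLoopA, pvLoopB]
  | succ n ih =>
    intro j
    simp only [pvLoopA, pvLoopB]
    split_ifs with h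
    · rw [pvLoopA_acc, pvLoopB_acc]
      have hcast : (j : Int) + (w : Int) = ((j + w : Nat) : Int) := by push_cast; ring
      have hsliceA : PySem.List.slice la (some (j : Int)) (some ((j : Int) + (w : Int))) = (la.drop j).take w := by
        rw [hcast]; exact_mod_cast PySem.List.slice_natCast_add (xs := la) (j := j) (n := w)
      have hsliceB : PySem.List.slice lb (some (j : Int)) (some ((j : Int) + (w : Int))) = (lb.drop j).take w := by
        rw [hcast]; exact_mod_cast PySem.List.slice_natCast_add (xs := lb) (j := j) (n := w)
      have hprefA : PySem.List.slice la none (some (j : Int)) = la.take j := PySem.List.slice_to_natCast la j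
      have hprefB : PySem.List.slice lb none (some (j : Int)) = lb.take j := PySem.List.slice_to_natCast lb j
      have haddA : ((la.take (j + w)).countP (fun c => c != '-') : Int)
          = ((la.take j).countP (fun c => c != '-') : Int) + (((la.drop j).take w).countP (fun c => c != '-') : Int) := by
        rw [List.take_add, List.countP_append]; push_cast; ring
      have haddB : ((lb.take (j + w)).countP (fun c => c != '-') : Int)
          = ((lb.take j).countP (fun c => c != '-') : Int) + (((lb.drop j).take w).countP (fun c => c != '-') : Int) := by
        rw [List.take_add, List.countP_append]; push_cast; ring
      have hnA := pv_nongap_count ((la.drop j).take w)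
      have hnB := pv_nongap_count ((lb.drop j).take w)
      have hmid : ∀ ab : Char × Char, pvSimb ab.1 ab.2 =
          (if ab.1 == ab.2 && ab.1 != '-' && ab.2 != '-' then '|'
           else if ab.1 != '-' && ab.2 != '-' then '.' else ' ') := fun ab => pv_simb_eq ab.1 ab.2
      have hIH := ih (j + w)
      rw [hcast] at *
      simp only [hsliceA, hsliceB, hprefA, hprefB, hnA, hnB]
      simp only [funext hmid]
      rw [haddA, haddB] at hIH
      simp only [← add_assoc] at hIH
      rw [List.flatten_append, hIH]
      simp only [List.flatMap_append, List.flatMap_cons, List.flatMap_nil]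
      rw [show off_a + ((la.take j).countP (fun c => c != '-') : Int) + 1 + (((la.drop j).take w).countP (fun c => c != '-') : Int) - 1
            = off_a + ((la.take j).countP (fun c => c != '-') : Int) + (((la.drop j).take w).countP (fun c => c != '-') : Int) from by ring,
          show off_b + ((lb.take j).countP (fun c => c != '-') : Int) + 1 + (((lb.drop j).take w).countP (fun c => c != '-') : Int) - 1
            = off_b + ((lb.take j).countP (fun c => c != '-') : Int) + (((lb.drop j).take w).countP (fun c => c != '-') : Int) from by ring]
      simp [List.append_assoc]
    · simp

lemma pv_rstrip_newline (x : List Char) : PySem.Chars.rstrip (x ++ ['\n']) = PySem.Chars.rstrip x := by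
  have h : PySem.Chars.isspace '\n' = true := by decide
  simp [PySem.Chars.rstrip, h]

lemma pv_flatMap_join (p : List Char) (rest : List (List Char)) :
    (p :: rest).flatMap (fun l => l ++ ['\n']) = PySem.Chars.join ['\n'] (p :: rest) ++ ['\n'] := by
  induction rest generalizing p with
  | nil => simp [PySem.Chars.join_singleton]
  | cons q r ih => rw [PySem.Chars.join_cons_cons]; simp_all

lemma pv_rstrip_join (L : List (List Char)) :
    PySem.Chars.rstrip (PySem.Chars.join ['\n'] L) = PySem.Chars.rstrip (L.flatMap (fun l => l ++ ['\n'])) := by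
  cases L with
  | nil => simp [PySem.Chars.join_nil]
  | cons p rest => rw [pv_flatMap_join, pv_rstrip_newline]

theorem pv_final (alA alB ea eb : String) (ancho off_a off_b : Int)
    (hpre : alA.toList = [] ∨ 1 ≤ ancho) :
    formatear_bloques alA alB ea eb ancho off_a off_b = formatear_bloques_alt alA alB ea eb ancho off_a off_b := by
  unfold formatear_bloques formatear_bloques_alt
  rcases hpre with h | h
  · simp [h, pvLoopA, pvLoopB, PySem.Chars.join_nil]
  · have hw : ancho = ((ancho.toNat : Nat) : Int) := by omega
    have hrel := pv_loops_rel alA.toList alB.toList ea.toList eb.toList ancho.toNat off_a off_b (alA.toList.length + 1) 0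
    simp only [List.take_zero, List.countP_nil, Nat.cast_zero, add_zero] at hrel
    rw [pv_join_nil_flatten, hw, hrel, ← pv_rstrip_join]

-- ===== VERDICT (by name: the statement is the Claim_ definition above) =====
theorem formatear_bloques_spec : Claim_equal_formatear_bloques := by
  intro alA alB ea eb ancho off_a off_b _ hpre
  exact pv_final alA alB ea eb ancho off_a off_b hpre
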